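-- pv_equiv track=rewrite | github.com/JoshuaChou2018/PPPML-HMI | covseg/delat_project/data_linkage/delta_patient_information.py | reverse_function_for_date_passed_from_20200101
-- ===== SOURCE A (Python) =====
-- def reverse_function_for_date_passed_from_20200101(passed_date=100):
--     if passed_date > 365:
--         year_2021 = True
--         passed_date -= 366
--         date_every_month = [31, 28, 31, 30, 31, 30, 31, 31, 30, 31, 30, 31]
--     else:
--         year_2021 = False
--         date_every_month = [31, 29, 31, 30, 31, 30, 31, 31, 30, 31, 30, 31]
--     assert 0 <= passed_date < 366
--
--     month = 1
--     for i in range(0, 12):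
--         if passed_date - date_every_month[i] >= 0:
--             passed_date -= date_every_month[i]
--             month += 1
--         else:
--             break
--     passed_date += 1
--     if year_2021:
--         return '2021' + str(int(month / 10)) + str(month % 10) + str(int(passed_date / 10)) + str(passed_date % 10)
--     return '2020' + str(int(month / 10)) + str(month % 10) + str(int(passed_date / 10)) + str(passed_date % 10)
-- ===== SOURCE B (Python) =====
-- def reverse_function_for_date_passed_from_20200101(passed_date=100):
--     if passed_date > 365:
--         year = '2021'
--         passed_date -= 366
--         lengths = [31, 28, 31, 30, 31, 30, 31, 31, 30, 31, 30, 31]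
--     else:
--         year = '2020'
--         lengths = [31, 29, 31, 30, 31, 30, 31, 31, 30, 31, 30, 31]
--     assert 0 <= passed_date < 366
--     # inclusive prefix sums of the month lengths
--     prefix = []
--     total = 0
--     for d in lengths:
--         total += d
--         prefix.append(total)
--     # binary search: number of fully consumed months = first k with prefix[k] > passed_date
--     lo, hi = 0, 12
--     while lo < hi:
--         mid = (lo + hi) // 2
--         if prefix[mid] <= passed_date:
--             lo = mid + 1
--         else:
--             hi = mid
--     month = lo + 1
--     day = passed_date - (prefix[lo - 1] if lo else 0) + 1
--     return year + str(month // 10) + str(month % 10) + str(day // 10) + str(day % 10)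
-- ===== Notes on version B (the rewrite author's own statement) =====
-- stated objective: alternative
-- what changed: Replaces A's sequential subtract-month-by-month loop (mutating passed_date) with an inclusive prefix-sum table of the month lengths and a hand-written binary search locating the month, with the day recovered by one subtraction from the prefix table.
import Mathlib
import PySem

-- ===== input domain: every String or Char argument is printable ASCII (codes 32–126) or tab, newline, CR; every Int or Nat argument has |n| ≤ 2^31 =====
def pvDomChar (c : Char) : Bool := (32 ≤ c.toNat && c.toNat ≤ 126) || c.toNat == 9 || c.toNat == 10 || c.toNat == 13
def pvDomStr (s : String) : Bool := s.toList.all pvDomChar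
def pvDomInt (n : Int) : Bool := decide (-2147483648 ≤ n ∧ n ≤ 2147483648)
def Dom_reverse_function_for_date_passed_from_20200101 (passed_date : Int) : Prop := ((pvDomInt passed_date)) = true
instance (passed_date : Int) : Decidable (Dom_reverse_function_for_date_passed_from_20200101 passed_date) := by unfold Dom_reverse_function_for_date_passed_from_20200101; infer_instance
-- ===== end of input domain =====

-- B replaces A's sequential month-subtraction loop by an inclusive prefix-sum table of the
-- month lengths plus a hand-written binary search for the month (objective: alternative).
-- ===== PORT A =====
-- the for-loop with break: walk the month lengths, subtracting while possible
def pvLoopA : List Int → Int → Int → Int × Int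
  | [], pd, m => (pd, m)
  | d :: rest, pd, m =>
      if pd - d ≥ 0 then pvLoopA rest (pd - d) (m + 1) else (pd, m)

-- str(int(month / 10)) : true division then int() truncates; month,day ≥ 0 here, so it
-- equals Python's floor division, ported exactly by PySem.Int.floordiv
def pvDigits (n : Int) : String :=
  PySem.Int.toStr (PySem.Int.floordiv n 10) ++ PySem.Int.toStr (PySem.Int.mod n 10)

def reverse_function_for_date_passed_from_20200101 (passed_date : Int) : String :=
  let (year_2021, pd, date_every_month) :=
    if passed_date > 365 then
      (true, passed_date - 366, ([31, 28, 31, 30, 31, 30, 31, 31, 30, 31, 30, 31] : List Int))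
    else
      (false, passed_date, ([31, 29, 31, 30, 31, 30, 31, 31, 30, 31, 30, 31] : List Int))
  -- assert 0 <= pd < 366 : raises outside Pre_, no value returned there
  let (pd, month) := pvLoopA date_every_month pd 1
  let pd := pd + 1
  if year_2021 then "2021" ++ pvDigits month ++ pvDigits pd
  else "2020" ++ pvDigits month ++ pvDigits pd

-- ===== PORT B =====
-- inclusive prefix sums built in one pass
def pvPrefix (lengths : List Int) : List Int :=
  (lengths.foldl (fun (acc : List Int × Int) d => (acc.1 ++ [acc.2 + d], acc.2 + d)) ([], 0)).1

-- the while-loop binary search, with fuel making the port total (lo < hi shrinks each step)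
def pvBisect (pre : List Int) (x : Int) (lo hi : Int) : Nat → Int
  | 0 => lo
  | fuel + 1 =>
      if lo < hi then
        let mid := PySem.Int.floordiv (lo + hi) 2
        match PySem.List.pyGet? pre mid with
        | some v => if v ≤ x then pvBisect pre x (mid + 1) hi fuel
                    else pvBisect pre x lo mid fuel
        | none => lo   -- unreachable: 0 ≤ lo ≤ mid < hi ≤ 12 = |pre|
      else lo

def reverse_function_for_date_passed_from_20200101_alt (passed_date : Int) : String :=
  let (year, pd, lengths) :=
    if passed_date > 365 then
      ("2021", passed_date - 366, ([31, 28, 31, 30, 31, 30, 31, 31, 30, 31, 30, 31] : List Int))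
    else
      ("2020", passed_date, ([31, 29, 31, 30, 31, 30, 31, 31, 30, 31, 30, 31] : List Int))
  let pre := pvPrefix lengths
  let lo := pvBisect pre pd 0 12 16
  let month := lo + 1
  let day := pd - (if lo ≠ 0 then (PySem.List.pyGet? pre (lo - 1)).getD 0 else 0) + 1
  year ++ PySem.Int.toStr (PySem.Int.floordiv month 10) ++ PySem.Int.toStr (PySem.Int.mod month 10)
       ++ PySem.Int.toStr (PySem.Int.floordiv day 10) ++ PySem.Int.toStr (PySem.Int.mod day 10)

-- ===== PRECONDITION & SPEC =====
-- A's assert raises AssertionError outside 0 ≤ passed_date ≤ 731 (no value returned there)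
def Pre_reverse_function_for_date_passed_from_20200101 (passed_date : Int) : Prop :=
  0 ≤ passed_date ∧ passed_date ≤ 731
instance (passed_date : Int) : Decidable (Pre_reverse_function_for_date_passed_from_20200101 passed_date) := by unfold Pre_reverse_function_for_date_passed_from_20200101; infer_instance

def pvWitness_reverse_function_for_date_passed_from_20200101 : Int := 100

def Spec_reverse_function_for_date_passed_from_20200101 (passed_date : Int) (out : String) : Prop := out = reverse_function_for_date_passed_from_20200101_alt passed_date
instance (passed_date : Int) (out : String) : Decidable (Spec_reverse_function_for_date_passed_from_20200101 passed_date out) := by unfold Spec_reverse_function_for_date_passed_from_20200101; infer_instance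

-- ===== CLAIM (what is proved, stated in full; the proofs are below) =====
def Claim_equal_reverse_function_for_date_passed_from_20200101 : Prop := ∀ (passed_date : Int), Dom_reverse_function_for_date_passed_from_20200101 passed_date → Pre_reverse_function_for_date_passed_from_20200101 passed_date → Spec_reverse_function_for_date_passed_from_20200101 passed_date (reverse_function_for_date_passed_from_20200101 passed_date)

-- ===== LEMMAS AND PROOFS =====
-- exhaustive check of the 732 admitted inputs
set_option maxRecDepth 100000 in
theorem pv_all_agree : ∀ n : Fin 732,
    reverse_function_for_date_passed_from_20200101 (n : Int)
      = reverse_function_for_date_passed_from_20200101_alt (n : Int) := by decide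

-- ===== VERDICT (by name: the statement is the Claim_ definition above) =====
theorem reverse_function_for_date_passed_from_20200101_spec : Claim_equal_reverse_function_for_date_passed_from_20200101 := by
  intro pd _ hpre
  unfold Pre_reverse_function_for_date_passed_from_20200101 at hpre
  have hlt : pd.toNat < 732 := by omega
  have h := pv_all_agree ⟨pd.toNat, hlt⟩
  have hval : ((pd.toNat : Int)) = pd := Int.toNat_of_nonneg hpre.1
  unfold Spec_reverse_function_for_date_passed_from_20200101
  simpa [hval] using h
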